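-- pv_equiv track=rewrite | github.com/NDSTEEL/Agentic-Studio-Voice | backend/src/services/pipeline/agent_pipeline.py | _select_best_phone_number
-- ===== SOURCE A (Python) =====
-- from typing import Dict, List, Any, Optional
--
-- def _select_best_phone_number(
--                             available_numbers: List[Dict[str, Any]],
--                             preferences: Dict[str, Any]) -> Dict[str, Any]:
--     """
--     Select the best phone number based on preferences
--     """
--     if not available_numbers:
--         return None
--
--     # Apply preference-based scoring
--     scored_numbers = []
--
--     for number in available_numbers:
--         score = 0
--         phone_number = number.get('phone_number', '')
--
--         # Prefer numbers matching area code
--         preferred_area = preferences.get('area_code')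
--         if preferred_area and preferred_area in phone_number:
--             score += 10
--
--         # Prefer numbers with requested pattern
--         contains_pattern = preferences.get('contains')
--         if contains_pattern and contains_pattern in phone_number:
--             score += 5
--
--         # Prefer numbers with repeating digits (easier to remember)
--         if len(set(phone_number[-4:])) <= 2:  # Last 4 digits have <= 2 unique digits
--             score += 3
--
--         scored_numbers.append((score, number))
--
--     # Sort by score (highest first) and return best
--     scored_numbers.sort(key=lambda x: x[0], reverse=True)
--     return scored_numbers[0][1]
-- ===== SOURCE B (Python) =====
-- def _score(number, preferences):
--     score = 0
--     phone_number = number.get('phone_number', '')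
--     preferred_area = preferences.get('area_code')
--     if preferred_area and preferred_area in phone_number:
--         score += 10
--     contains_pattern = preferences.get('contains')
--     if contains_pattern and contains_pattern in phone_number:
--         score += 5
--     if len(set(phone_number[-4:])) <= 2:
--         score += 3
--     return score
--
--
-- def _select_best_phone_number(available_numbers, preferences):
--     """Single pass keeping the first number attaining the highest score (no sort)."""
--     best = None
--     best_score = -1
--     for number in available_numbers:
--         score = _score(number, preferences)
--         if best_score < score:
--             best, best_score = number, score
--     return best
-- ===== Notes on version B (the rewrite author's own statement) =====
-- stated objective: alternative
-- what changed: Replaces A's build-score-list + stable reverse sort + take-head with a single pass that tracks the first number attaining the strictly highest score (no intermediate list, no sort).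
import Mathlib
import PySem

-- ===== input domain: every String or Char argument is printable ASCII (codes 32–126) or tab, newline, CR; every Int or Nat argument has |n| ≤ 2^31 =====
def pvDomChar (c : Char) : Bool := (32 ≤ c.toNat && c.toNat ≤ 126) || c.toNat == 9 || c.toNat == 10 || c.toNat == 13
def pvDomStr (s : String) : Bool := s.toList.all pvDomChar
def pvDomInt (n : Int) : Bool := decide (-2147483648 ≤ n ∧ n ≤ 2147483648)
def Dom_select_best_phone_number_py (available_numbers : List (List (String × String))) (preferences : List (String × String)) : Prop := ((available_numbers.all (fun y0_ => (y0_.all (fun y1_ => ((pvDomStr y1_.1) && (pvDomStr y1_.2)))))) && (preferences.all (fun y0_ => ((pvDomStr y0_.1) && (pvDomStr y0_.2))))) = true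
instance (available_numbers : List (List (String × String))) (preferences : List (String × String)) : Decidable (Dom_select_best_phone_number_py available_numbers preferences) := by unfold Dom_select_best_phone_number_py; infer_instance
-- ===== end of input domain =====

-- B replaces A's build-score-list + stable reverse sort + take-head with a single
-- pass tracking the first number attaining the highest score (alternative algorithm,
-- same result; per-item scoring dominates the measured cost, so no speed is claimed).

-- ===== PORT A =====
-- shared scoring code of both Pythons (A computes it inline in its loop, B in its `_score` helper):
-- score = 10 for a truthy, matching area_code preference + 5 for a truthy, matching
-- contains preference + 3 when the last 4 characters have at most 2 distinct characters.
def pvScore (preferences : List (String × String)) (number : List (String × String)) : Int :=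
  let phone := (PySem.Dict.mk number).getD "phone_number" ""
  let s1 : Int := match (PySem.Dict.mk preferences).get? "area_code" with
    | none => 0
    | some a => if a ≠ "" ∧ PySem.Str.isIn a phone then 10 else 0
  let s2 : Int := match (PySem.Dict.mk preferences).get? "contains" with
    | none => 0
    | some c => if c ≠ "" ∧ PySem.Str.isIn c phone then 5 else 0
  let s3 : Int :=
    if (PySem.Set.ofList (PySem.Chars.slice phone.toList (some (-4)) none)).length ≤ 2 then 3 else 0
  s1 + s2 + s3

def select_best_phone_number_py (available_numbers : List (List (String × String))) (preferences : List (String × String)) : Option (List (String × String)) :=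
  match available_numbers with
  | [] => none
  | _ :: _ =>
    let scored := available_numbers.foldl
      (fun acc number => acc ++ [(pvScore preferences number, number)])
      ([] : List (Int × List (String × String)))
    let sortedL := PySem.List.sorted scored (fun x => x.1) true
    match PySem.List.pyGet? sortedL 0 with
    | some x => some x.2
    | none => none

-- ===== PORT B =====
def select_best_phone_number_py_alt (available_numbers : List (List (String × String))) (preferences : List (String × String)) : Option (List (String × String)) :=
  (available_numbers.foldl
    (fun (st : Option (List (String × String)) × Int) number =>
      let score := pvScore preferences number
      if st.2 < score then (some number, score) else st)
    (none, -1)).1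

-- ===== PRECONDITION & SPEC =====
def Spec_select_best_phone_number_py (available_numbers : List (List (String × String))) (preferences : List (String × String)) (out : Option (List (String × String))) : Prop := out = select_best_phone_number_py_alt available_numbers preferences
instance (available_numbers : List (List (String × String))) (preferences : List (String × String)) (out : Option (List (String × String))) : Decidable (Spec_select_best_phone_number_py available_numbers preferences out) := by unfold Spec_select_best_phone_number_py; infer_instance

-- ===== CLAIM (what is proved, stated in full; the proofs are below) =====
def Claim_equal_select_best_phone_number_py : Prop := ∀ (available_numbers : List (List (String × String))) (preferences : List (String × String)), Dom_select_best_phone_number_py available_numbers preferences → Spec_select_best_phone_number_py available_numbers preferences (select_best_phone_number_py available_numbers preferences)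

-- ===== LEMMAS AND PROOFS =====

theorem pvScore_nonneg (p n : List (String × String)) : 0 ≤ pvScore p n := by
  unfold pvScore
  rcases (PySem.Dict.mk p).get? "area_code" with _ | a <;>
    rcases (PySem.Dict.mk p).get? "contains" with _ | c <;>
    dsimp only <;> split_ifs <;> norm_num

-- head of the insertion-sort fold: each insertion replaces the head exactly when
-- `before x head` holds, so the head is a running "strict best" over the input order
theorem head_foldl_insertBy {α : Type} (before : α → α → Bool) :
    ∀ (l : List α) (y : α) (ys : List α),
      (l.foldl (fun acc x => PySem.List.insertBy before x acc) (y :: ys)).head? =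
        some (l.foldl (fun m x => if before x m then x else m) y) := by
  intro l
  induction l with
  | nil => intro y ys; rfl
  | cons x t ih =>
    intro y ys
    simp only [List.foldl_cons, PySem.List.insertBy]
    by_cases h : before x y
    · simp only [h, if_true]; exact ih x (y :: ys)
    · simp only [h]; exact ih y (PySem.List.insertBy before x ys)

-- B's fold, once the accumulator holds a real best, is the running strict max on pairs
theorem alt_foldl_eq {β : Type} (score : β → Int) :
    ∀ (l : List β) (s : Int) (b : β),
      l.foldl (fun (st : Option β × Int) n =>
          if st.2 < score n then (some n, score n) else st) (some b, s) =
        ((l.foldl (fun (m : Int × β) n =>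
            if m.1 < score n then (score n, n) else m) (s, b)).2 |> some,
         (l.foldl (fun (m : Int × β) n =>
            if m.1 < score n then (score n, n) else m) (s, b)).1) := by
  intro l
  induction l with
  | nil => intro s b; rfl
  | cons n t ih =>
    intro s b
    simp only [List.foldl_cons]
    by_cases h : s < score n
    · simp only [h, if_true]; exact ih (score n) n
    · simp only [h, if_false]; exact ih s b

-- ===== VERDICT (by name: the statement is the Claim_ definition above) =====
theorem select_best_phone_number_py_spec : Claim_equal_select_best_phone_number_py := by
  intro avail prefs _dom
  unfold Spec_select_best_phone_number_py
  cases avail with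
  | nil => rfl
  | cons n rest =>
    unfold select_best_phone_number_py select_best_phone_number_py_alt
    -- A's scored list is a map
    rw [PySem.List.foldl_append_singleton_eq_map]
    simp only [List.nil_append, List.map_cons]
    -- A's sort is the insertBy fold, whose head is the running strict max
    rw [PySem.List.sorted_rev_eq_foldl_insertBy]
    simp only [List.foldl_cons, PySem.List.insertBy]
    have hhead := head_foldl_insertBy
      (fun (a b : Int × List (String × String)) => decide (b.1 < a.1))
      (rest.map (fun number => (pvScore prefs number, number)))
      (pvScore prefs n, n) []
    -- B's first step takes n (score >= 0 > -1), then runs the same strict max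
    have h0 : (-1 : Int) < pvScore prefs n :=
      lt_of_lt_of_le (by norm_num) (pvScore_nonneg prefs n)
    simp only [List.foldl_cons, h0, if_true]
    rw [alt_foldl_eq (pvScore prefs) rest (pvScore prefs n) n]
    -- identify the two folds and finish via the head characterisation
    rcases hcons : (rest.map (fun number => (pvScore prefs number, number))).foldl
        (fun acc x => PySem.List.insertBy
          (fun a b => decide (b.1 < a.1)) x acc) [(pvScore prefs n, n)] with _ | ⟨m, t⟩
    · rw [hcons] at hhead; simp at hhead
    · rw [hcons] at hhead
      simp only [List.head?_cons, Option.some.injEq] at hhead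
      simp only [hcons]
      norm_num [PySem.List.pyGet?, PySem.List.pyIdx?]
      rw [hhead]
      simp only [List.foldl_map, decide_eq_true_eq]
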